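-- pv_equiv track=rewrite | github.com/MrBrantCode/unitest_baseline | mut_generate/mist_train_taco/taco_16545/solution.py | calculate_fest_value
-- ===== SOURCE A (Python) =====
-- def calculate_fest_value(numbers):
--     """
--     Calculate the value M modulo (10^9 + 7) for a given list of numbers.
--
--     Parameters:
--     numbers (list of int): A list of integers representing the elements of the list L.
--
--     Returns:
--     int: The computed value M modulo (10^9 + 7).
--     """
--     from collections import Counter
--     from functools import reduce
--     from itertools import accumulate, combinations, takewhile, product
--
--     modo = 10 ** 9 + 7
--
--     class Lucmat:
--         def __init__(s, P, Q, Iv, modo):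
--             (s.matBase, s.modo, s.pows, po, s.Iv) = ([[P, -Q], [1, 0]], modo, {}, 1, Iv)
--             s.pows[1] = s.matBase
--             s.mbl = 1
--             s.modo = modo
--
--         def sqmatmulmod(s, m1, m2):
--             mr = list(([0] * 2 for _ in range(2)))
--             for l in range(len(m1)):
--                 for c in range(len(m1)):
--                     mr[l][c] = sum((m1[l][ix] * m2[ix][c] for ix in range(len(m1)))) % s.modo
--             return mr
--
--         def do(s, po):
--             if po < 2:
--                 return s.Iv[po]
--             for bl in range(s.mbl, po.bit_length()):
--                 s.pows[bl + 1] = s.sqmatmulmod(s.pows[bl], s.pows[bl])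
--             s.mbl = po.bit_length()
--             pc = 1
--             while not po & 1:
--                 (po, pc) = (po >> 1, pc + 1)
--             (rm, pc, po) = (s.pows[pc], pc + 1, po >> 1)
--             while po:
--                 if po & 1:
--                     rm = s.sqmatmulmod(s.pows[pc], rm)
--                 (pc, po) = (pc + 1, po >> 1)
--             return rm[0][0] * s.Iv[0] + rm[0][1] * s.Iv[1]
--
--     def faire(s):
--         Fm = Lucmat(6, 1, (1, 3), modo)
--         r = 1
--         for v in s:
--             r = 2 * r * Fm.do(v) % modo
--         return r
--
--     return faire(numbers)
-- ===== SOURCE B (Python) =====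
-- def calculate_fest_value(numbers):
--     """Same result as A: iterated product r = (2*r*u_v) mod 1e9+7, where u is the
--     half-Lucas sequence u_0=1, u_1=3, u_{n+1}=6u_n-u_{n-1}, computed by fast doubling."""
--     MOD = 10 ** 9 + 7
--
--     def pair(n):
--         # returns (u_n mod MOD, u_{n+1} mod MOD) by fast doubling on the bits of n
--         if n == 0:
--             return (1, 3)
--         a, b = pair(n >> 1)
--         c = (2 * a * a - 1) % MOD          # u_{2k} = 2*u_k^2 - 1
--         d = (2 * a * b - 3) % MOD          # u_{2k+1} = 2*u_k*u_{k+1} - 3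
--         if n & 1:
--             return (d, (6 * d - c) % MOD)
--         return (c, d)
--
--     r = 1
--     for v in numbers:
--         r = 2 * r * pair(v)[0] % MOD
--     return r
-- ===== Notes on version B (the rewrite author's own statement) =====
-- stated objective: alternative
-- what changed: Replaced the stateful 2x2 matrix-exponentiation class (per-call cache of squared matrices, bit-scan product of cached matrices) by a recursive fast-doubling computation of the half-Lucas pair (u_n, u_{n+1}) mod 10^9+7 using u_{2k}=2u_k^2-1 and u_{2k+1}=2u_k u_{k+1}-3, threading only two scalars per bit instead of matrices and a cache.
-- outside the precondition, e.g. on calculate_fest_value([-1]): A returns 6, B raises RecursionError; on calculate_fest_value([-2]): A returns 2, B raises RecursionError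
import Mathlib
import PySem

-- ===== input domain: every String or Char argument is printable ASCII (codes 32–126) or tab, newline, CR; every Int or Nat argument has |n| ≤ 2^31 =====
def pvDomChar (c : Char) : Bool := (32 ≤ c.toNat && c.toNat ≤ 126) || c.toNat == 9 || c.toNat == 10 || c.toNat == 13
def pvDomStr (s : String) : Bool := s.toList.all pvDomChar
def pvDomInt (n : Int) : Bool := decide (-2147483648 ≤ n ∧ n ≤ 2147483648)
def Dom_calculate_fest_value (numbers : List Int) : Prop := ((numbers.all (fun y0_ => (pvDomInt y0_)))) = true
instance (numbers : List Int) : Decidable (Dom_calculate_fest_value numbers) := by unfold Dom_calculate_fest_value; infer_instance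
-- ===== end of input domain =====

-- B replaces A's cached 2x2 matrix exponentiation by scalar fast doubling of the
-- half-Lucas pair (u_n, u_{n+1}) mod 10^9+7 — no matrices or power cache are kept.

-- ===== PORT A =====
def pvMODO : Int := 10 ^ 9 + 7

-- a 2x2 Python list-of-lists matrix [[a,b],[c,d]]
structure PvMat where
  a : Int
  b : Int
  c : Int
  d : Int
deriving Repr, DecidableEq

-- sqmatmulmod with the two range(2) loops unrolled: each entry is the same modded sum
def pvSqMatMulMod (modo : Int) (m1 m2 : PvMat) : PvMat :=
  ⟨PySem.Int.mod (m1.a * m2.a + m1.b * m2.c) modo,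
   PySem.Int.mod (m1.a * m2.b + m1.b * m2.d) modo,
   PySem.Int.mod (m1.c * m2.a + m1.d * m2.c) modo,
   PySem.Int.mod (m1.c * m2.b + m1.d * m2.d) modo⟩

def pvMatBase : PvMat := ⟨6, -1, 1, 0⟩

-- default never read on inputs where the Python runs (cache keys 1..mbl are always present)
def pvDflt : PvMat := ⟨0, 0, 0, 0⟩

-- 'for bl in range(s.mbl, po.bit_length()): s.pows[bl+1] = sqmatmulmod(pows[bl], pows[bl])'
def pvGrow (modo : Int) (pows : PySem.Dict Nat PvMat) (bl t : Nat) : PySem.Dict Nat PvMat :=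
  if bl < t then
    pvGrow modo (pows.insert (bl + 1)
      (pvSqMatMulMod modo (pows.getD bl pvDflt) (pows.getD bl pvDflt))) (bl + 1) t
  else pows
termination_by t - bl

-- 'while not po & 1: (po, pc) = (po >> 1, pc + 1)'  (po ≠ 0 guard only for totality)
def pvStrip (po pc : Nat) : Nat × Nat :=
  if po % 2 = 0 ∧ po ≠ 0 then pvStrip (po / 2) (pc + 1) else (po, pc)
termination_by po
decreasing_by exact Nat.div_lt_self (Nat.pos_of_ne_zero (by omega)) (by omega)

-- 'while po: if po & 1: rm = sqmatmulmod(pows[pc], rm); (pc, po) = (pc+1, po>>1)'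
def pvDoLoop (modo : Int) (pows : PySem.Dict Nat PvMat) (rm : PvMat) (pc po : Nat) : PvMat :=
  if po = 0 then rm
  else
    pvDoLoop modo pows
      (if po % 2 = 1 then pvSqMatMulMod modo (pows.getD pc pvDflt) rm else rm)
      (pc + 1) (po / 2)
termination_by po
decreasing_by exact Nat.div_lt_self (Nat.pos_of_ne_zero (by omega)) (by omega)

-- Lucmat.do; the mutated cache state (pows, mbl) is threaded; none = IndexError on s.Iv[po]
def pvDo (modo : Int) (pows : PySem.Dict Nat PvMat) (mbl : Nat) (po : Int) :
    (PySem.Dict Nat PvMat × Nat) × Option Int :=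
  if po < 2 then ((pows, mbl), PySem.List.pyGet? [(1 : Int), 3] po)
  else
    let n := po.toNat
    let bln := PySem.Int.bitLength po
    let pows1 := pvGrow modo pows mbl bln
    let sp := pvStrip n 1
    let rm0 := pows1.getD sp.2 pvDflt
    let rm := pvDoLoop modo pows1 rm0 (sp.2 + 1) (sp.1 / 2)
    ((pows1, bln), some (rm.a * 1 + rm.b * 3))

-- faire: 'r = 2 * r * Fm.do(v) % modo' over the list, threading the Lucmat state
def pvFaire (modo : Int) (l : List Int) (st : PySem.Dict Nat PvMat × Nat) (r : Int) : Option Int :=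
  match l with
  | [] => some r
  | v :: rest =>
    match pvDo modo st.1 st.2 v with
    | (_, none) => none
    | (st', some x) => pvFaire modo rest st' (PySem.Int.mod (2 * r * x) modo)

def calculate_fest_value (numbers : List Int) : Int :=
  (pvFaire pvMODO numbers (PySem.Dict.empty.insert 1 pvMatBase, 1) 1).getD 0

-- ===== PORT B =====
-- fast-doubling pair (u_n mod p, u_{n+1} mod p); Source B's recursion on n >> 1
-- (Nat argument: Source B's pair diverges on negative n, which Pre_ excludes)
def pvPair (n : Nat) : Int × Int :=
  if n = 0 then (1, 3)
  else
    let ab := pvPair (n / 2)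
    let c := PySem.Int.mod (2 * ab.1 * ab.1 - 1) pvMODO
    let d := PySem.Int.mod (2 * ab.1 * ab.2 - 3) pvMODO
    if n % 2 = 1 then (d, PySem.Int.mod (6 * d - c) pvMODO) else (c, d)
termination_by n
decreasing_by exact Nat.div_lt_self (Nat.pos_of_ne_zero (by omega)) (by omega)

def calculate_fest_value_alt (numbers : List Int) : Int :=
  numbers.foldl (fun r v => PySem.Int.mod (2 * r * (pvPair v.toNat).1) pvMODO) 1

-- ===== PRECONDITION & SPEC =====
-- Pre_ excludes lists containing a negative index: entries ≤ -3 make A raise IndexError on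
-- s.Iv[po], and on entries -1/-2 A returns a value only through accidental negative tuple-index
-- wraparound while B's doubling recursion does not terminate there (RecursionError).
def Pre_calculate_fest_value (numbers : List Int) : Prop := ∀ v ∈ numbers, 0 ≤ v
instance (numbers : List Int) : Decidable (Pre_calculate_fest_value numbers) := by
  unfold Pre_calculate_fest_value; infer_instance

def pvWitness_calculate_fest_value : List Int := [0, 1, 5, 12]

def Spec_calculate_fest_value (numbers : List Int) (out : Int) : Prop :=
  out = calculate_fest_value_alt numbers
instance (numbers : List Int) (out : Int) : Decidable (Spec_calculate_fest_value numbers out) := by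
  unfold Spec_calculate_fest_value; infer_instance

-- ===== CLAIM (what is proved, stated in full; the proofs are below) =====
def Claim_equal_calculate_fest_value : Prop :=
  ∀ (numbers : List Int), Dom_calculate_fest_value numbers →
    Pre_calculate_fest_value numbers →
    Spec_calculate_fest_value numbers (calculate_fest_value numbers)

-- ===== LEMMAS AND PROOFS =====

-- the half-Lucas sequence u_0 = 1, u_1 = 3, u_{n+2} = 6 u_{n+1} - u_n
def pvU : Nat → Int
  | 0 => 1
  | 1 => 3
  | n + 2 => 6 * pvU (n + 1) - pvU n

theorem pvU_step (n : Nat) : pvU (n + 2) = 6 * pvU (n + 1) - pvU n := rfl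

theorem pvU_inv (k : Nat) :
    pvU (k + 1) * pvU (k + 1) - 6 * pvU k * pvU (k + 1) + pvU k * pvU k = -8 := by
  induction k with
  | zero => decide
  | succ k ih => rw [pvU_step]; ring_nf; ring_nf at ih; linarith

theorem pvU_double (k : Nat) :
    pvU (2 * k) = 2 * pvU k * pvU k - 1 ∧
    pvU (2 * k + 1) = 2 * pvU k * pvU (k + 1) - 3 := by
  induction k with
  | zero => decide
  | succ k ih =>
    obtain ⟨h1, h2⟩ := ih
    have hinv := pvU_inv k
    have e1 : 2 * (k + 1) = (2 * k) + 2 := by ring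
    have e2 : 2 * (k + 1) + 1 = (2 * k + 1) + 2 := by ring
    have ha : pvU (2 * (k + 1)) = 6 * pvU (2 * k + 1) - pvU (2 * k) := by
      rw [e1, pvU_step]
    have hb : pvU (2 * (k + 1) + 1) = 6 * pvU (2 * (k + 1)) - pvU (2 * k + 1) := by
      rw [e2, pvU_step, show 2 * k + 1 + 1 = 2 * (k + 1) by ring]
    have heven : pvU (2 * (k + 1)) = 2 * pvU (k + 1) * pvU (k + 1) - 1 := by
      rw [ha, h1, h2]; linarith
    refine ⟨heven, ?_⟩
    rw [hb, heven, h2, pvU_step]; ring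

-- real (unreduced) matrix arithmetic used as the specification of A's cached powers
def pvMatMul (m1 m2 : PvMat) : PvMat :=
  ⟨m1.a * m2.a + m1.b * m2.c, m1.a * m2.b + m1.b * m2.d,
   m1.c * m2.a + m1.d * m2.c, m1.c * m2.b + m1.d * m2.d⟩

def pvMpow : Nat → PvMat
  | 0 => ⟨1, 0, 0, 1⟩
  | n + 1 => pvMatMul pvMatBase (pvMpow n)

def pvMatCong (m1 m2 : PvMat) : Prop :=
  m1.a ≡ m2.a [ZMOD pvMODO] ∧ m1.b ≡ m2.b [ZMOD pvMODO] ∧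
  m1.c ≡ m2.c [ZMOD pvMODO] ∧ m1.d ≡ m2.d [ZMOD pvMODO]

theorem pvMODO_pos : (0 : Int) < pvMODO := by norm_num [pvMODO]

theorem pvMod_eq (x : Int) : PySem.Int.mod x pvMODO = x % pvMODO :=
  PySem.Int.mod_eq_emod_of_pos pvMODO_pos

theorem pvEmod_cong (x : Int) : x % pvMODO ≡ x [ZMOD pvMODO] :=
  Int.emod_emod_of_dvd x dvd_rfl

theorem pvSq_cong {m1 m2 n1 n2 : PvMat} (h1 : pvMatCong m1 n1) (h2 : pvMatCong m2 n2) :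
    pvMatCong (pvSqMatMulMod pvMODO m1 m2) (pvMatMul n1 n2) := by
  obtain ⟨a1, b1, c1, d1⟩ := h1
  obtain ⟨a2, b2, c2, d2⟩ := h2
  refine ⟨?_, ?_, ?_, ?_⟩ <;>
    simp only [pvSqMatMulMod, pvMatMul, pvMod_eq] <;>
    exact (pvEmod_cong _).trans (Int.ModEq.add (by exact Int.ModEq.mul ‹_› ‹_›)
      (by exact Int.ModEq.mul ‹_› ‹_›))

theorem pvMatMul_assoc (x y z : PvMat) :
    pvMatMul (pvMatMul x y) z = pvMatMul x (pvMatMul y z) := by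
  obtain ⟨a, b, c, d⟩ := x; obtain ⟨e, f, g, h⟩ := y; obtain ⟨i, j, k, l⟩ := z
  simp only [pvMatMul, PvMat.mk.injEq]
  refine ⟨by ring, by ring, by ring, by ring⟩

theorem pvMatMul_one_left (x : PvMat) : pvMatMul ⟨1, 0, 0, 1⟩ x = x := by
  obtain ⟨a, b, c, d⟩ := x
  simp only [pvMatMul, PvMat.mk.injEq]
  refine ⟨by ring, by ring, by ring, by ring⟩

theorem pvMpow_add (m n : Nat) : pvMpow (m + n) = pvMatMul (pvMpow m) (pvMpow n) := by
  induction m with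
  | zero => simp [pvMpow, pvMatMul_one_left]
  | succ m ih =>
    have : m + 1 + n = (m + n) + 1 := by omega
    rw [this]
    show pvMatMul pvMatBase (pvMpow (m + n)) = _
    rw [ih]
    show _ = pvMatMul (pvMatMul pvMatBase (pvMpow m)) (pvMpow n)
    rw [pvMatMul_assoc]

-- the linear form (M^n)[0][0] + 3 (M^n)[0][1] is exactly u_n
theorem pvMpow_lin (n : Nat) :
    (pvMpow n).a + 3 * (pvMpow n).b = pvU n ∧
    (pvMpow (n + 1)).a + 3 * (pvMpow (n + 1)).b = pvU (n + 1) := by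
  induction n with
  | zero => decide
  | succ n ih =>
    obtain ⟨h1, h2⟩ := ih
    refine ⟨h2, ?_⟩
    have hc : (pvMpow (n + 1)).c = (pvMpow n).a := by
      show (pvMatMul pvMatBase (pvMpow n)).c = _
      simp [pvMatMul, pvMatBase]
    have hd : (pvMpow (n + 1)).d = (pvMpow n).b := by
      show (pvMatMul pvMatBase (pvMpow n)).d = _
      simp [pvMatMul, pvMatBase]
    show (pvMatMul pvMatBase (pvMpow (n + 1))).a + 3 * (pvMatMul pvMatBase (pvMpow (n + 1))).b
        = pvU (n + 2)
    simp only [pvMatMul, pvMatBase, pvU_step]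
    rw [← h2, ← h1, hc, hd]; ring

-- A's cache invariant: every key 1..m holds a matrix ≡ M^(2^(k-1)) mod p
def pvGoodUpTo (pows : PySem.Dict Nat PvMat) (m : Nat) : Prop :=
  ∀ k, 1 ≤ k → k ≤ m → pvMatCong (pows.getD k pvDflt) (pvMpow (2 ^ (k - 1)))

theorem pvGrow_good_aux (fuel : Nat) : ∀ (t : Nat) (pows : PySem.Dict Nat PvMat) (bl : Nat),
    t - bl ≤ fuel → 1 ≤ bl → pvGoodUpTo pows bl →
    pvGoodUpTo (pvGrow pvMODO pows bl t) (max bl t) := by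
  induction fuel with
  | zero =>
    intro t pows bl hf h1 hg
    rw [pvGrow, if_neg (by omega)]
    rw [Nat.max_eq_left (by omega)]
    exact hg
  | succ fuel ih =>
    intro t pows bl hf h1 hg
    by_cases hlt : bl < t
    · rw [pvGrow, if_pos hlt]
      have hg' : pvGoodUpTo (pows.insert (bl + 1)
          (pvSqMatMulMod pvMODO (pows.getD bl pvDflt) (pows.getD bl pvDflt))) (bl + 1) := by
        intro k hk1 hk2
        rw [PySem.Dict.getD_insert]
        by_cases hk : k = bl + 1
        · rw [if_pos hk, hk]
          have hbl := hg bl h1 (le_refl bl)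
          have hsq := pvSq_cong hbl hbl
          rw [← pvMpow_add] at hsq
          have he : 2 ^ (bl - 1) + 2 ^ (bl - 1) = 2 ^ (bl + 1 - 1) := by
            have h2 : 2 ^ (bl + 1 - 1) = 2 ^ (bl - 1) * 2 := by
              rw [Nat.add_sub_cancel, ← pow_succ]
              congr 1
              omega
            omega
          rwa [he] at hsq
        · rw [if_neg hk]
          exact hg k hk1 (by omega)
      have hres := ih t _ (bl + 1) (by omega) (by omega) hg'
      rw [Nat.max_eq_right (by omega : bl + 1 ≤ t)] at hres
      rw [Nat.max_eq_right (by omega : bl ≤ t)]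
      exact hres
    · rw [pvGrow, if_neg hlt]
      rw [Nat.max_eq_left (by omega)]
      exact hg

theorem pvGrow_good (t : Nat) : ∀ pows bl, 1 ≤ bl → pvGoodUpTo pows bl →
    pvGoodUpTo (pvGrow pvMODO pows bl t) (max bl t) :=
  fun pows bl h1 hg => pvGrow_good_aux (t - bl) t pows bl (le_refl _) h1 hg

theorem pvStrip_spec (po : Nat) : ∀ pc, po ≠ 0 →
    (pvStrip po pc).1 % 2 = 1 ∧ 2 ^ ((pvStrip po pc).2 - pc) * (pvStrip po pc).1 = po ∧
    pc ≤ (pvStrip po pc).2 := by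
  induction po using Nat.strong_induction_on with
  | _ po ih =>
    intro pc hpo
    rw [pvStrip]
    by_cases h : po % 2 = 0 ∧ po ≠ 0
    · simp only [if_pos h]
      have hlt : po / 2 < po := Nat.div_lt_self (Nat.pos_of_ne_zero hpo) (by omega)
      have hne : po / 2 ≠ 0 := by omega
      obtain ⟨o1, o2, o3⟩ := ih (po / 2) hlt (pc + 1) hne
      refine ⟨o1, ?_, by omega⟩
      have he : (pvStrip (po / 2) (pc + 1)).2 - pc =
          ((pvStrip (po / 2) (pc + 1)).2 - (pc + 1)) + 1 := by omega
      rw [he, pow_succ]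
      calc 2 ^ ((pvStrip (po / 2) (pc + 1)).2 - (pc + 1)) * 2 * (pvStrip (po / 2) (pc + 1)).1
          = 2 * (2 ^ ((pvStrip (po / 2) (pc + 1)).2 - (pc + 1)) * (pvStrip (po / 2) (pc + 1)).1) := by
            ring
        _ = 2 * (po / 2) := by rw [o2]
        _ = po := by omega
    · simp only [if_neg h]
      refine ⟨by omega, by simp, le_refl pc⟩

theorem pvDoLoop_cong (pows : PySem.Dict Nat PvMat) (N : Nat)
    (Hg : ∀ k, 1 ≤ k → 2 ^ (k - 1) ≤ N →
      pvMatCong (pows.getD k pvDflt) (pvMpow (2 ^ (k - 1)))) :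
    ∀ po pc rm e, 1 ≤ pc → 2 ^ (pc - 1) * po ≤ N → pvMatCong rm (pvMpow e) →
      pvMatCong (pvDoLoop pvMODO pows rm pc po) (pvMpow (e + 2 ^ (pc - 1) * po)) := by
  intro po
  induction po using Nat.strong_induction_on with
  | _ po ih =>
    intro pc rm e hpc hbound hrm
    rw [pvDoLoop]
    by_cases h0 : po = 0
    · subst h0
      simpa using hrm
    · simp only [if_neg h0]
      have hlt : po / 2 < po := Nat.div_lt_self (Nat.pos_of_ne_zero h0) (by omega)
      have hpow : (2 : Nat) ^ pc = 2 ^ (pc - 1) * 2 := by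
        rw [← pow_succ]; congr 1; omega
      have hb2 : 2 ^ ((pc + 1) - 1) * (po / 2) ≤ N := by
        calc 2 ^ ((pc + 1) - 1) * (po / 2) = 2 ^ (pc - 1) * (2 * (po / 2)) := by
              rw [Nat.add_sub_cancel, hpow]; ring
          _ ≤ 2 ^ (pc - 1) * po := Nat.mul_le_mul_left _ (by omega)
          _ ≤ N := hbound
      by_cases hodd : po % 2 = 1
      · have hrm' : pvMatCong (pvSqMatMulMod pvMODO (pows.getD pc pvDflt) rm)
            (pvMpow (2 ^ (pc - 1) + e)) := by
          have hkey : pvMatCong (pows.getD pc pvDflt) (pvMpow (2 ^ (pc - 1))) := by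
            apply Hg pc hpc
            calc 2 ^ (pc - 1) = 2 ^ (pc - 1) * 1 := by ring
              _ ≤ 2 ^ (pc - 1) * po := Nat.mul_le_mul_left _ (by omega)
              _ ≤ N := hbound
          have := pvSq_cong hkey hrm
          rwa [← pvMpow_add] at this
        rw [if_pos hodd]
        have := ih (po / 2) hlt (pc + 1) _ (2 ^ (pc - 1) + e) (by omega) hb2 hrm'
        have he : 2 ^ (pc - 1) + e + 2 ^ ((pc + 1) - 1) * (po / 2) =
            e + 2 ^ (pc - 1) * po := by
          rw [Nat.add_sub_cancel, hpow]
          have hd : po = 2 * (po / 2) + 1 := by omega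
          calc 2 ^ (pc - 1) + e + 2 ^ (pc - 1) * 2 * (po / 2)
              = e + 2 ^ (pc - 1) * (2 * (po / 2) + 1) := by ring
            _ = e + 2 ^ (pc - 1) * po := by rw [← hd]
        rwa [he] at this
      · rw [if_neg hodd]
        have := ih (po / 2) hlt (pc + 1) rm e (by omega) hb2 hrm
        have he : e + 2 ^ ((pc + 1) - 1) * (po / 2) = e + 2 ^ (pc - 1) * po := by
          rw [Nat.add_sub_cancel, hpow]
          have hd : po = 2 * (po / 2) := by omega
          calc e + 2 ^ (pc - 1) * 2 * (po / 2) = e + 2 ^ (pc - 1) * (2 * (po / 2)) := by ring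
            _ = e + 2 ^ (pc - 1) * po := by rw [← hd]
        rwa [he] at this

def pvInvSt (st : PySem.Dict Nat PvMat × Nat) : Prop :=
  1 ≤ st.2 ∧ pvGoodUpTo st.1 st.2

theorem pvDo_spec (pows : PySem.Dict Nat PvMat) (mbl : Nat) (po : Int)
    (hinv : pvInvSt (pows, mbl)) (hpo : 0 ≤ po) :
    ∃ st' x, pvDo pvMODO pows mbl po = (st', some x) ∧ pvInvSt st' ∧
      x ≡ pvU po.toNat [ZMOD pvMODO] := by
  obtain ⟨hmbl, hgood⟩ := hinv
  by_cases hlt : po < 2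
  · have : po = 0 ∨ po = 1 := by omega
    rcases this with h | h <;> subst h
    · exact ⟨(pows, mbl), 1, by rw [pvDo, if_pos (by norm_num)]; rfl,
        ⟨hmbl, hgood⟩, by decide⟩
    · exact ⟨(pows, mbl), 3, by rw [pvDo, if_pos (by norm_num)]; rfl,
        ⟨hmbl, hgood⟩, by decide⟩
  · -- po ≥ 2
    have hn2 : 2 ≤ po.toNat := by omega
    have hnz : po.toNat ≠ 0 := by omega
    -- every key whose power fits below po.toNat is ≤ bitLength po
    have hbits : ∀ k : Nat, 2 ^ (k - 1) ≤ po.toNat → k ≤ PySem.Int.bitLength po := by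
      intro k hk
      have habs : po.natAbs = po.toNat := by omega
      have := PySem.Int.lt_two_pow_bitLength po
      rw [habs] at this
      have hlt2 : 2 ^ (k - 1) < 2 ^ PySem.Int.bitLength po := lt_of_le_of_lt hk this
      have := (Nat.pow_lt_pow_iff_right (by omega : 1 < 2)).mp hlt2
      omega
    set n := po.toNat with hn
    set bln := PySem.Int.bitLength po with hbln
    set pows1 := pvGrow pvMODO pows mbl bln with hpows1
    have hgood1 : pvGoodUpTo pows1 (max mbl bln) := pvGrow_good bln pows mbl hmbl hgood
    have Hg : ∀ k, 1 ≤ k → 2 ^ (k - 1) ≤ n →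
        pvMatCong (pows1.getD k pvDflt) (pvMpow (2 ^ (k - 1))) := by
      intro k h1 h2
      exact hgood1 k h1 (le_trans (hbits k h2) (le_max_right _ _))
    obtain ⟨hodd, heq, hpc⟩ := pvStrip_spec n 1 hnz
    set o := (pvStrip n 1).1 with ho
    set c := (pvStrip n 1).2 with hc
    have hopos : 1 ≤ o := by omega
    have hcle : 2 ^ (c - 1) ≤ n := by
      calc 2 ^ (c - 1) = 2 ^ (c - 1) * 1 := by ring
        _ ≤ 2 ^ (c - 1) * o := Nat.mul_le_mul_left _ hopos
        _ = n := heq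
    have hrm0 : pvMatCong (pows1.getD c pvDflt) (pvMpow (2 ^ (c - 1))) :=
      Hg c (by omega) hcle
    have hpow : (2 : Nat) ^ c = 2 ^ (c - 1) * 2 := by
      rw [← pow_succ]; congr 1; omega
    have hbound : 2 ^ ((c + 1) - 1) * (o / 2) ≤ n := by
      have hod : o = 2 * (o / 2) + 1 := by omega
      calc 2 ^ ((c + 1) - 1) * (o / 2) = 2 ^ (c - 1) * (2 * (o / 2)) := by
            rw [Nat.add_sub_cancel, hpow]; ring
        _ ≤ 2 ^ (c - 1) * o := Nat.mul_le_mul_left _ (by omega)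
        _ = n := heq
    have hloop := pvDoLoop_cong pows1 n Hg (o / 2) (c + 1)
      (pows1.getD c pvDflt) (2 ^ (c - 1)) (by omega) hbound hrm0
    have hexp : 2 ^ (c - 1) + 2 ^ ((c + 1) - 1) * (o / 2) = n := by
      have hod : o = 2 * (o / 2) + 1 := by omega
      calc 2 ^ (c - 1) + 2 ^ ((c + 1) - 1) * (o / 2)
          = 2 ^ (c - 1) * (2 * (o / 2) + 1) := by rw [Nat.add_sub_cancel, hpow]; ring
        _ = 2 ^ (c - 1) * o := by rw [← hod]
        _ = n := heq
    rw [hexp] at hloop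
    set rm := pvDoLoop pvMODO pows1 (pows1.getD c pvDflt) (c + 1) (o / 2) with hrm
    refine ⟨(pows1, bln), rm.a * 1 + rm.b * 3, ?_, ?_, ?_⟩
    · rw [pvDo, if_neg (by omega)]
    · refine ⟨hbits 1 (by simpa using (by omega : 1 ≤ n)), ?_⟩
      intro k h1 h2
      exact hgood1 k h1 (le_trans h2 (le_max_right _ _))
    · have hlin := (pvMpow_lin n).1
      obtain ⟨ha, hb, _, _⟩ := hloop
      calc rm.a * 1 + rm.b * 3 ≡ (pvMpow n).a * 1 + (pvMpow n).b * 3 [ZMOD pvMODO] :=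
            (ha.mul (Int.ModEq.refl 1)).add (hb.mul (Int.ModEq.refl 3))
        _ = pvU n := by rw [← hlin]; ring

theorem pvPair_spec (n : Nat) :
    pvPair n = (pvU n % pvMODO, pvU (n + 1) % pvMODO) := by
  induction n using Nat.strong_induction_on with
  | _ n ih =>
    rw [pvPair]
    by_cases h0 : n = 0
    · subst h0
      have : pvU 0 % pvMODO = 1 ∧ pvU 1 % pvMODO = 3 := by decide
      simp [this.1, this.2]
    · simp only [if_neg h0]
      have hlt : n / 2 < n := Nat.div_lt_self (Nat.pos_of_ne_zero h0) (by omega)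
      rw [ih (n / 2) hlt]
      have ha : pvU (n / 2) % pvMODO ≡ pvU (n / 2) [ZMOD pvMODO] := pvEmod_cong _
      have hb : pvU (n / 2 + 1) % pvMODO ≡ pvU (n / 2 + 1) [ZMOD pvMODO] := pvEmod_cong _
      have hc : PySem.Int.mod
          (2 * (pvU (n / 2) % pvMODO) * (pvU (n / 2) % pvMODO) - 1) pvMODO =
          pvU (2 * (n / 2)) % pvMODO := by
        rw [pvMod_eq, (pvU_double (n / 2)).1]
        exact ((((Int.ModEq.refl 2).mul ha).mul ha).sub (Int.ModEq.refl 1))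
      have hd : PySem.Int.mod
          (2 * (pvU (n / 2) % pvMODO) * (pvU (n / 2 + 1) % pvMODO) - 3) pvMODO =
          pvU (2 * (n / 2) + 1) % pvMODO := by
        rw [pvMod_eq, (pvU_double (n / 2)).2]
        exact ((((Int.ModEq.refl 2).mul ha).mul hb).sub (Int.ModEq.refl 3))
      by_cases hp : n % 2 = 1
      · simp only [if_pos hp, hc, hd]
        have hn : n = 2 * (n / 2) + 1 := by omega
        refine Prod.ext ?_ ?_
        · show pvU (2 * (n / 2) + 1) % pvMODO = pvU n % pvMODO
          rw [← hn]
        · show PySem.Int.mod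
            (6 * (pvU (2 * (n / 2) + 1) % pvMODO) - pvU (2 * (n / 2)) % pvMODO) pvMODO =
            pvU (n + 1) % pvMODO
          rw [pvMod_eq]
          have h6 : 6 * (pvU (2 * (n / 2) + 1) % pvMODO) - pvU (2 * (n / 2)) % pvMODO ≡
              6 * pvU (2 * (n / 2) + 1) - pvU (2 * (n / 2)) [ZMOD pvMODO] :=
            ((Int.ModEq.refl 6).mul (pvEmod_cong _)).sub (pvEmod_cong _)
          have hstep : 6 * pvU (2 * (n / 2) + 1) - pvU (2 * (n / 2)) = pvU (n + 1) := by
            rw [show n + 1 = 2 * (n / 2) + 2 by omega, pvU_step]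
          calc 6 * (pvU (2 * (n / 2) + 1) % pvMODO) - pvU (2 * (n / 2)) % pvMODO ≡
              6 * pvU (2 * (n / 2) + 1) - pvU (2 * (n / 2)) [ZMOD pvMODO] := h6
            _ = pvU (n + 1) := hstep
      · simp only [if_neg hp, hc, hd]
        have hn : n = 2 * (n / 2) := by omega
        refine Prod.ext ?_ ?_
        · show pvU (2 * (n / 2)) % pvMODO = pvU n % pvMODO
          rw [← hn]
        · show pvU (2 * (n / 2) + 1) % pvMODO = pvU (n + 1) % pvMODO
          rw [← hn]

theorem pvFaire_spec (l : List Int) : ∀ st r, (∀ v ∈ l, 0 ≤ v) → pvInvSt st →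
    pvFaire pvMODO l st r =
      some (l.foldl (fun r v => PySem.Int.mod (2 * r * (pvPair v.toNat).1) pvMODO) r) := by
  induction l with
  | nil => intro st r _ _; rfl
  | cons v rest ih =>
    intro st r hpre hinv
    obtain ⟨st', x, hdo, hinv', hx⟩ := pvDo_spec st.1 st.2 v hinv (hpre v (by simp))
    rw [pvFaire]
    rw [hdo]
    have hval : PySem.Int.mod (2 * r * x) pvMODO =
        PySem.Int.mod (2 * r * (pvPair v.toNat).1) pvMODO := by
      rw [pvMod_eq, pvMod_eq, pvPair_spec]
      exact (Int.ModEq.refl (2 * r)).mul (hx.trans (pvEmod_cong _).symm)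
    rw [List.foldl_cons, ← hval]
    exact ih st' _ (fun w hw => hpre w (by simp [hw])) hinv'

-- ===== VERDICT (by name: the statement is the Claim_ definition above) =====
theorem calculate_fest_value_spec : Claim_equal_calculate_fest_value := by
  intro numbers _ hpre
  unfold Spec_calculate_fest_value calculate_fest_value calculate_fest_value_alt
  rw [pvFaire_spec numbers _ 1 hpre ?_]
  · rfl
  · constructor
    · exact le_refl 1
    · intro k h1 h2
      have hk : k = 1 := by omega
      subst hk
      simp only [PySem.Dict.getD_insert_self]
      show pvMatCong pvMatBase (pvMpow 1)
      have : pvMpow 1 = pvMatBase := by decide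
      rw [this]
      exact ⟨Int.ModEq.refl _, Int.ModEq.refl _, Int.ModEq.refl _, Int.ModEq.refl _⟩
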